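/- GENERATED by farm/worked/mk_tree_copies.py from farm/worked/compute_codewords.COMPOSITION/Proof.lean (a worked proof of the farm's unit `compute_codewords.COMPOSITION`,
   accepted by the verdict) — do not edit. -/
import Vorbis.Spec.Units.compute_codewords_COMPOSITION

/- THE COMPOSITION OF compute_codewords (in the farm's format): the nine segment statements give the function's contract, by
   `ReachVia.trans` along the cut points and, for the main loop `for (i = k+1; i < n; ++i)` (head `cut8`, assertion `AtMain i`), an
   induction on the measure `n − i`: every way round the loop (segments 5, 6 | 5, 6, 7, 8 | 5, 6, 7, 8, 9) arrives at `AtMain (i + 1)`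
   after passing `AtLen i`, whose field `i_lt` says `i < n`. The three exits (`k == n` in segment 2, `return TRUE` in segment 5,
   `return FALSE` in segment 7) are `Returned` of the contract already. No machine code is walked. -/
open X86 X86.User Asan Vorbis Vorbis.Spec

namespace Vorbis.Spec.Worked.compute_codewords_COMPOSITION
open Vorbis.Spec.compute_codewords_COMPOSITION (Statement)

/-- From the head of the main loop with index `i` the function returns: induction on `a ≥ n − i`. -/
theorem codewords_from_main_w {Lay : Layout} {μ : Microarch} {u₀ : State}
    (hseg5 : compute_codewords.Seg5 Lay μ u₀) (hseg6 : compute_codewords.Seg6 Lay μ u₀)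
    (hseg7 : compute_codewords.Seg7 Lay μ u₀) (hseg8 : compute_codewords.Seg8 Lay μ u₀)
    (hseg9 : compute_codewords.Seg9 Lay μ u₀)
    (others : List Obj) (frames : List (Nat × FrameLayout)) (Blk : Block → Prop) (u : State) (ret : Word) :
    ∀ (a i : Nat) (v : State), (u.reg .rdx).toNat % 2 ^ 32 - i ≤ a →
      compute_codewords.AtMain others frames Blk u₀ u ret i v →
      ReachVia Lay μ WayInv v (Returned (conv u₀) (compute_codewords.spec others frames Blk) u ret) := by
  intro a
  induction a with
  | zero =>
    intro i v ha hv
    apply (hseg5 others frames Blk u ret i v hv).trans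
    intro w hw
    rcases hw with hlen | hret
    · -- `i < n` contradicts `n − i ≤ 0`
      have hlt := hlen.i_lt
      omega
    · exact ReachVia.done hret
  | succ a ih =>
    intro i v ha hv
    apply (hseg5 others frames Blk u ret i v hv).trans
    intro w hw
    rcases hw with hlen | hret
    · have hlt := hlen.i_lt
      apply (hseg6 others frames Blk u ret i w hlen).trans
      intro w2 hw2
      rcases hw2 with hmain | hscan
      · -- `continue`: `len[i] = NO_CODE`
        exact ih (i + 1) w2 (by omega) hmain
      · apply (hseg7 others frames Blk u ret i w2 hscan).trans
        intro w3 hw3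
        rcases hw3 with ⟨z, hres⟩ | hret
        · apply (hseg8 others frames Blk u ret i z w3 hres).trans
          intro w4 hw4
          rcases hw4 with hmain | hprop
          · -- `z == len[i]`: nothing to propagate
            exact ih (i + 1) w4 (by omega) hmain
          · apply (hseg9 others frames Blk u ret i z w4 hprop).trans
            intro w5 hmain
            exact ih (i + 1) w5 (by omega) hmain
        · -- `return FALSE`
          exact ReachVia.done hret
    · -- `return TRUE`
      exact ReachVia.done hret

end Vorbis.Spec.Worked.compute_codewords_COMPOSITION

theorem Vorbis.Spec.Worked.compute_codewords_COMPOSITION_ok : Vorbis.Spec.compute_codewords_COMPOSITION.Statement := by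
  intro Lay hLay μ hμ u₀ hseg1 hseg2 hseg3 hseg4 hseg5 hseg6 hseg7 hseg8 hseg9 others frames Blk u ret he hpre
  apply (hseg1 others frames Blk u ret he hpre).trans
  intro v1 h1
  apply (hseg2 others frames Blk u ret v1 h1).trans
  intro v2 h2
  rcases h2 with ⟨k, hfirst⟩ | hret
  · apply (hseg3 others frames Blk u ret k v2 hfirst).trans
    intro v3 h3
    apply (hseg4 others frames Blk u ret k v3 h3).trans
    intro v4 h4
    exact Vorbis.Spec.Worked.compute_codewords_COMPOSITION.codewords_from_main_w hseg5 hseg6 hseg7 hseg8 hseg9 others frames Blk u ret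
      _ (k + 1) v4 (Nat.le_refl _) h4
  · exact ReachVia.done hret
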